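-- pv_equiv track=rewrite | github.com/max644/matasano | 6.py | buildByteBlocks
-- ===== SOURCE A (Python) =====
-- def buildByteBlocks(cipher, keysize):
-- 	blocks = []
-- 	for idx in range(0, len(cipher), keysize):
-- 		blocks.append(cipher[idx:idx+keysize])
--
-- 	byteBlocks = []
-- 	for byteIdx in range(0, keysize):
-- 		byteBlock = []
-- 		for block in blocks:
-- 			if byteIdx < len(block):
-- 				byteBlock.append(block[byteIdx])
-- 		byteBlocks.append(byteBlock)
-- 	return byteBlocks
-- ===== SOURCE B (Python) =====
-- def buildByteBlocks(cipher, keysize):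
-- 	# single pass: scatter each byte straight into its key-position column
-- 	if keysize <= 0:
-- 		return []
-- 	columns = [[] for _ in range(keysize)]
-- 	for i, c in enumerate(cipher):
-- 		columns[i % keysize].append(c)
-- 	return columns
-- ===== Notes on version B (the rewrite author's own statement) =====
-- stated objective: simpler
-- what changed: Replaces A's two-phase chunk-then-gather (build keysize-sized blocks, then for each key position scan all blocks) with a single enumerate pass that appends each byte directly to column i % keysize.
import Mathlib
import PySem

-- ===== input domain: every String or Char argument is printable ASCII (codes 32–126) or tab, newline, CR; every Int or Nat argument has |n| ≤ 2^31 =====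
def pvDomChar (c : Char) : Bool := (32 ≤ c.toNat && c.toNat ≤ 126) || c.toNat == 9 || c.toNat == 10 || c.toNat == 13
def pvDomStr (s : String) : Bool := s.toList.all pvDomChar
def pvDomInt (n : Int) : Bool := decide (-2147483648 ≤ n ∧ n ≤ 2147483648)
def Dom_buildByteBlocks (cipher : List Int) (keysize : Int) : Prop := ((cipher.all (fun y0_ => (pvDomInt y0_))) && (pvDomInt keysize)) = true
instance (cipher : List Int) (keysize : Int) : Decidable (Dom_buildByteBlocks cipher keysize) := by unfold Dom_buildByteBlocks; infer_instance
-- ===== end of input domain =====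

-- B replaces A's chunk-then-gather with one enumerate pass scattering each byte to column i % keysize (simpler; same asymptotic cost). A raises ValueError at keysize == 0 (excluded by Pre_); B returns [] there.


-- ===== PORT A =====
def buildByteBlocks (cipher : List Int) (keysize : Int) : List (List Int) :=
  -- blocks = []; for idx in range(0, len(cipher), keysize): blocks.append(cipher[idx:idx+keysize])
  let blocks : List (List Int) :=
    (PySem.List.pyRange 0 (cipher.length : Int) keysize).foldl
      (fun blocks idx => blocks ++ [PySem.List.slice cipher (some idx) (some (idx + keysize))]) []
  -- byteBlocks = []; for byteIdx in range(0, keysize): inner gather loop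
  (PySem.List.pyRange 0 keysize 1).foldl
    (fun byteBlocks byteIdx =>
      byteBlocks ++ [blocks.foldl
        (fun byteBlock block =>
          if byteIdx < (block.length : Int) then
            -- block[byteIdx]: the guard ensures 0 ≤ byteIdx < len(block), so pyGetD is exact
            byteBlock ++ [PySem.List.pyGetD block byteIdx 0]
          else byteBlock) []]) []

-- ===== PORT B =====
def buildByteBlocks_alt (cipher : List Int) (keysize : Int) : List (List Int) :=
  if keysize ≤ 0 then []
  else
    -- columns = [[] for _ in range(keysize)]; for i, c in enumerate(cipher): columns[i % keysize].append(c)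
    -- i % keysize lies in [0, keysize) since keysize > 0, so .toNat is exact here
    (PySem.List.enumerate cipher 0).foldl
      (fun cols p => cols.modify (PySem.Int.mod p.1 keysize).toNat (fun col => col ++ [p.2]))
      (List.replicate keysize.toNat [])

-- ===== PRECONDITION & SPEC =====
-- Pre_ excludes exactly keysize = 0, where Python A raises ValueError (range() step 0).
def Pre_buildByteBlocks (cipher : List Int) (keysize : Int) : Prop := keysize ≠ 0
instance (cipher : List Int) (keysize : Int) : Decidable (Pre_buildByteBlocks cipher keysize) := by unfold Pre_buildByteBlocks; infer_instance
def pvWitness_buildByteBlocks : List Int × Int := ([72, 105, 33], 2)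

def Spec_buildByteBlocks (cipher : List Int) (keysize : Int) (out : List (List Int)) : Prop := out = buildByteBlocks_alt cipher keysize
instance (cipher : List Int) (keysize : Int) (out : List (List Int)) : Decidable (Spec_buildByteBlocks cipher keysize out) := by unfold Spec_buildByteBlocks; infer_instance

-- ===== CLAIM (what is proved, stated in full; the proofs are below) =====
def Claim_equal_buildByteBlocks : Prop := ∀ (cipher : List Int) (keysize : Int), Dom_buildByteBlocks cipher keysize → Pre_buildByteBlocks cipher keysize → Spec_buildByteBlocks cipher keysize (buildByteBlocks cipher keysize)
-- ===== LEMMAS AND PROOFS =====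

/-- Chunks of size `K` (what A's first loop builds), defined structurally for the proofs. -/
def pvChunks (K : Nat) (l : List Int) : List (List Int) :=
  if K = 0 ∨ l = [] then [] else l.take K :: pvChunks K (l.drop K)
termination_by l.length
decreasing_by
  simp only [List.length_drop]
  rcases l with _ | ⟨x, l⟩ <;> simp_all
  omega

theorem pvChunks_nil (K : Nat) : pvChunks K [] = [] := by
  rw [pvChunks]; simp

theorem pvChunks_cons (K : Nat) (l : List Int) (hK : K ≠ 0) (hl : l ≠ []) :
    pvChunks K l = l.take K :: pvChunks K (l.drop K) := by
  rw [pvChunks]; simp [hK, hl]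

/-- A's first loop (slices at idx = 0, K, 2K, …) builds exactly the chunks. -/
theorem pv_blocks_eq_chunks (K : Nat) (hK : 0 < K) :
    ∀ (n : Nat) (l : List Int), l.length ≤ n →
    (PySem.List.pyRange 0 (l.length : Int) (K : Int)).map
      (fun idx => PySem.List.slice l (some idx) (some (idx + (K : Int)))) = pvChunks K l := by
  have hKpos : (0 : Int) < (K : Int) := by exact_mod_cast hK
  intro n
  induction n with
  | zero =>
    intro l hl
    have : l = [] := by cases l <;> simp_all
    subst this
    simp [pvChunks_nil, PySem.List.pyRange_of_pos 0 0 hKpos]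
  | succ n ih =>
    intro l hl
    rcases eq_or_ne l [] with rfl | hne
    · simp [pvChunks_nil, PySem.List.pyRange_of_pos 0 0 hKpos]
    · have h0 : 0 < l.length := List.length_pos_iff.mpr hne
      rw [pvChunks_cons K l (by omega) hne, ← ih (l.drop K) (by simp; omega)]
      rw [PySem.List.pyRange_of_pos 0 _ hKpos, PySem.List.pyRange_of_pos 0 _ hKpos]
      have hg0 : PySem.List.slice l (some (0 + (K:Int) * ((0:Nat):Int))) (some (0 + (K:Int) * ((0:Nat):Int) + (K:Int))) = l.take K := by
        have e : (0 + (K:Int) * ((0:Nat):Int)) = ((0:Nat):Int) := by push_cast; ring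
        have e2 : (0 + (K:Int) * ((0:Nat):Int) + (K:Int)) = (((0:Nat)):Int) + ((K:Nat):Int) := by push_cast; ring
        rw [e2, e, PySem.List.slice_natCast_add l 0 K, List.drop_zero]
      have hentry : ∀ m : Nat,
          PySem.List.slice l (some (0 + (K:Int) * ((m+1:Nat):Int))) (some (0 + (K:Int) * ((m+1:Nat):Int) + (K:Int)))
            = PySem.List.slice (l.drop K) (some (0 + (K:Int) * ((m:Nat):Int))) (some (0 + (K:Int) * ((m:Nat):Int) + (K:Int))) := by
        intro m
        have e1 : (0 + (K:Int) * ((m+1:Nat):Int)) = ((K*(m+1) : Nat) : Int) := by push_cast; ring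
        have e2 : (0 + (K:Int) * ((m+1:Nat):Int) + (K:Int)) = ((K*(m+1) : Nat) : Int) + ((K:Nat):Int) := by push_cast; ring
        have e3 : (0 + (K:Int) * ((m:Nat):Int)) = ((K*m : Nat) : Int) := by push_cast; ring
        have e4 : (0 + (K:Int) * ((m:Nat):Int) + (K:Int)) = ((K*m : Nat) : Int) + ((K:Nat):Int) := by push_cast; ring
        rw [e2, e1, PySem.List.slice_natCast_add l (K*(m+1)) K,
            e4, e3, PySem.List.slice_natCast_add (l.drop K) (K*m) K,
            List.drop_drop]
        congr 2
        ring
      by_cases hKl : K < l.length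
      · have hlt1 : (0:Int) < (l.length : Int) := by exact_mod_cast h0
        have hlt2 : (0:Int) < ((l.drop K).length : Int) := by simp; omega
        rw [if_pos hlt1, if_pos hlt2]
        have hM : (((l.length : Int) - 0 + (K:Int) - 1) / (K:Int)).toNat
            = ((((l.drop K).length : Int) - 0 + (K:Int) - 1) / (K:Int)).toNat + 1 := by
          have e : ((l.length : Int) - 0 + (K:Int) - 1) = (((l.drop K).length : Int) - 0 + (K:Int) - 1) + 1 * (K:Int) := by
            simp only [List.length_drop]
            push_cast [Nat.cast_sub hKl.le]
            ring
          rw [e, Int.add_mul_ediv_right _ _ (ne_of_gt hKpos)]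
          have hq : 0 ≤ (((l.drop K).length : Int) - 0 + (K:Int) - 1) / (K:Int) :=
            Int.ediv_nonneg (by simp; omega) hKpos.le
          omega
        rw [hM, List.range_succ_eq_map]
        simp only [List.map_cons, List.map_map]
        congr 1
        apply List.map_congr_left
        intro m _
        simp only [Function.comp_apply, Nat.succ_eq_add_one]
        exact hentry m
      · have hlt1 : (0:Int) < (l.length : Int) := by exact_mod_cast h0
        have hdrop : l.drop K = [] := by simp; omega
        have hlt2 : ¬ (0:Int) < (((l.drop K).length : Int)) := by simp [hdrop]
        rw [if_pos hlt1, if_neg hlt2]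
        have hM : (((l.length : Int) - 0 + (K:Int) - 1) / (K:Int)).toNat = 1 := by
          rw [← PySem.Int.floordiv_eq_ediv_of_pos hKpos]
          have h1 : PySem.Int.floordiv ((l.length : Int) - 0 + (K:Int) - 1) (K:Int) = 1 := by
            rw [PySem.Int.floordiv_eq_iff_of_pos hKpos]
            constructor <;> push_cast <;> omega
          rw [h1]
          rfl
        rw [hM]
        simp only [List.range_one, List.map_cons, List.map_nil, hg0]
        rw [hdrop]
        simp

/-- One chunk (length ≤ K) enumerated at offset s*K + t contributes its j-th element iff it has one. -/
theorem pv_en1 (K : Nat) (hK : 0 < K) (j : Nat) (hj : j < K) :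
    ∀ (b : List Int) (s t : Nat), t + b.length ≤ K →
    ((PySem.List.enumerate b ((s * K + t : Nat) : Int)).filter
        (fun p => (PySem.Int.mod p.1 (K : Int)).toNat == j)).map (·.2)
      = if t ≤ j ∧ j < t + b.length then [b.getD (j - t) 0] else [] := by
  intro b
  induction b with
  | nil =>
    intro s t _
    rw [if_neg (by simp only [List.length_nil]; omega)]
    simp [PySem.List.enumerate_nil]
  | cons x b ih =>
    intro s t hlen
    rw [PySem.List.enumerate_cons, List.filter_cons]
    have ht : t < K := by simp only [List.length_cons] at hlen; omega
    have hmod : (PySem.Int.mod ((s * K + t : Nat) : Int) (K : Int)).toNat = t := by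
      rw [PySem.Int.mod_eq_emod_of_pos (by exact_mod_cast hK), ← Int.natCast_mod,
        Int.toNat_natCast, Nat.add_comm, Nat.add_mul_mod_self_right, Nat.mod_eq_of_lt ht]
    have hoff : ((s * K + t : Nat) : Int) + 1 = ((s * K + (t + 1) : Nat) : Int) := by push_cast; ring
    have hlen' : (t + 1) + b.length ≤ K := by simp only [List.length_cons] at hlen; omega
    by_cases htj : t = j
    · subst htj
      simp only [hmod, beq_self_eq_true, if_pos]
      rw [List.map_cons, hoff, ih s (t + 1) hlen']
      rw [if_neg (by omega), if_pos (by simp only [List.length_cons]; omega)]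
      simp
    · simp only [hmod, beq_iff_eq, if_neg htj]
      rw [hoff, ih s (t + 1) hlen']
      by_cases hc : t ≤ j ∧ j < t + (x :: b).length
      · rw [if_pos (by simp only [List.length_cons] at hc ⊢; omega), if_pos hc]
        have h1 : j - t = (j - (t + 1)) + 1 := by omega
        simp [h1]
      · rw [if_neg (by simp only [List.length_cons] at hc ⊢; omega), if_neg hc]

/-- The bytes whose index is ≡ j (mod K) are exactly the j-th elements of the chunks. -/
theorem pv_sel (K : Nat) (hK : 0 < K) (j : Nat) (hj : j < K) :
    ∀ (n : Nat) (l : List Int), l.length ≤ n → ∀ (s : Nat),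
    ((PySem.List.enumerate l ((s * K : Nat) : Int)).filter
        (fun p => (PySem.Int.mod p.1 (K : Int)).toNat == j)).map (·.2)
      = ((pvChunks K l).filter (fun b => decide ((j : Int) < (b.length : Int)))).map
          (fun b => PySem.List.pyGetD b (j : Int) 0) := by
  intro n
  induction n with
  | zero =>
    intro l hl s
    have : l = [] := by cases l <;> simp_all
    subst this
    simp [pvChunks_nil, PySem.List.enumerate_nil]
  | succ n ih =>
    intro l hl s
    rcases eq_or_ne l [] with rfl | hne
    · simp [pvChunks_nil, PySem.List.enumerate_nil]
    · have h0 : 0 < l.length := List.length_pos_iff.mpr hne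
      have hsplit := (List.take_append_drop K l).symm
      rw [pvChunks_cons K l (by omega) hne]
      conv_lhs => rw [hsplit]
      rw [PySem.List.enumerate_append, List.filter_append, List.map_append]
      have hfirst := pv_en1 K hK j hj (l.take K) s 0 (by simp)
      simp only [Nat.add_zero, Nat.zero_add, Nat.zero_le, true_and] at hfirst
      rw [hfirst]
      rw [List.filter_cons]
      have htail :
          ((PySem.List.enumerate (l.drop K) (((s * K : Nat) : Int) + ((l.take K).length : Int))).filter
              (fun p => (PySem.Int.mod p.1 (K : Int)).toNat == j)).map (·.2)
            = ((pvChunks K (l.drop K)).filter (fun b => decide ((j : Int) < (b.length : Int)))).map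
                (fun b => PySem.List.pyGetD b (j : Int) 0) := by
        by_cases hKl : K ≤ l.length
        · have hlen : (l.take K).length = K := by simp; omega
          have hoff : ((s * K : Nat) : Int) + ((l.take K).length : Int) = (((s + 1) * K : Nat) : Int) := by
            rw [hlen]; push_cast; ring
          rw [hoff, ih (l.drop K) (by simp; omega) (s + 1)]
        · have hdrop : l.drop K = [] := by simp; omega
          rw [hdrop, pvChunks_nil]
          simp [PySem.List.enumerate_nil]
      rw [htail]
      by_cases hlt : j < (l.take K).length
      · rw [if_pos hlt, if_pos (by simp only [decide_eq_true_eq]; exact_mod_cast hlt)]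
        rw [List.map_cons, PySem.List.pyGetD_natCast]
        simp
      · rw [if_neg hlt, if_neg (by simp only [decide_eq_true_eq]; exact_mod_cast hlt)]
        simp

/-- Invariant of B's scatter fold: column j collects exactly the values whose index is ≡ j (mod K). -/
theorem pv_inv (K : Nat) (l : List (Int × Int)) :
    ∀ (cols : List (List Int)) (j : Nat),
    (l.foldl (fun cols p => cols.modify (PySem.Int.mod p.1 (K : Int)).toNat (fun col => col ++ [p.2])) cols)[j]?
      = cols[j]?.map (fun col => col ++ (l.filter (fun p => (PySem.Int.mod p.1 (K : Int)).toNat == j)).map (·.2)) := by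
  induction l with
  | nil => intro cols j; simp
  | cons p l ih =>
    intro cols j
    simp only [List.foldl_cons, List.filter_cons]
    rw [ih]
    by_cases hm : (PySem.Int.mod p.1 (K : Int)).toNat = j
    · simp [hm, Option.map_map]
      cases cols[j]? <;> simp [Function.comp]
    · simp [hm]

/-- Prop-test variant of PySem.List.foldl_append_if, for A's inner `if byteIdx < len(block)`. -/
theorem pv_foldl_append_ite {α β : Type} (P : α → Prop) [DecidablePred P] (f : α → β) :
    ∀ (l : List α) (acc : List β),
    l.foldl (fun acc x => if P x then acc ++ [f x] else acc) acc
      = acc ++ (l.filter (fun x => decide (P x))).map f := by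
  intro l
  induction l with
  | nil => intro acc; simp
  | cons x l ih =>
    intro acc
    simp only [List.foldl_cons, List.filter_cons]
    by_cases hx : P x
    · rw [if_pos hx, ih]; simp [hx]
    · rw [if_neg hx, ih]; simp [hx]

-- ===== VERDICT (by name: the statement is the Claim_ definition above) =====
theorem buildByteBlocks_spec : Claim_equal_buildByteBlocks := by
  intro cipher keysize _hdom hpre
  unfold Spec_buildByteBlocks buildByteBlocks buildByteBlocks_alt Pre_buildByteBlocks at *
  by_cases hk : keysize ≤ 0
  · rw [if_pos hk]
    rw [PySem.List.pyRange_one_eq_nil (by omega)]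
    rfl
  · rw [if_neg hk]
    have hKpos : 0 < keysize.toNat := by omega
    have hks : keysize = (keysize.toNat : Int) := by omega
    rw [hks]
    simp only [PySem.List.foldl_append_singleton_eq_map, List.nil_append,
      pv_blocks_eq_chunks keysize.toNat hKpos cipher.length cipher le_rfl,
      PySem.List.pyRange_one, Int.sub_zero, Int.toNat_natCast,
      pv_foldl_append_ite, List.map_map, zero_add]
    apply List.ext_getElem?
    intro i
    rw [pv_inv keysize.toNat]
    by_cases hi : i < keysize.toNat
    · have hL : (List.range keysize.toNat)[i]? = some i := by simp [hi]
      have hR : (List.replicate keysize.toNat ([] : List Int))[i]? = some [] := by simp [hi]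
      rw [List.getElem?_map, hL, hR]
      simp only [Option.map_some, Function.comp_apply, Option.some.injEq]
      have h0 : ((0 * keysize.toNat : Nat) : Int) = 0 := by simp
      have hsel := pv_sel keysize.toNat hKpos i hi cipher.length cipher le_rfl 0
      rw [h0] at hsel
      rw [hsel]
      simp
    · have hL : (List.range keysize.toNat)[i]? = none := by simp [hi]
      have hR : (List.replicate keysize.toNat ([] : List Int))[i]? = none := by simp [hi]
      rw [List.getElem?_map, hL, hR]
      simp
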